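-- pv_equiv track=rewrite | github.com/nrdyava/Automated-Measurement-of-Fetal-Head-Area-in-Ultrasound-Images | data_downloader.py | index_finder
-- ===== SOURCE A (Python) =====
-- def index_finder(row,width):
--     for i in range(width):
--         if row[i]==255:
--             left_index=i
--             for j in range(width):
--                 if row[width-1-j]==255:
--                     right_index=width-1-j
--                     return {'left_index':left_index,'right_index':right_index}
-- ===== SOURCE B (Python) =====
-- def index_finder(row, width):
--     left = None
--     right = None
--     for i in range(width):
--         if row[i] == 255:
--             if left is None:
--                 left = i
--             right = i
--     if left is None:
--         return None
--     return {'left_index': left, 'right_index': right}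
-- ===== Notes on version B (the rewrite author's own statement) =====
-- stated objective: simpler
-- what changed: A scans forward for the first 255 and then restarts a second full backward scan for the last 255; B makes one forward pass tracking first and last occurrence simultaneously and returns None explicitly when no 255 exists.
import Mathlib
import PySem

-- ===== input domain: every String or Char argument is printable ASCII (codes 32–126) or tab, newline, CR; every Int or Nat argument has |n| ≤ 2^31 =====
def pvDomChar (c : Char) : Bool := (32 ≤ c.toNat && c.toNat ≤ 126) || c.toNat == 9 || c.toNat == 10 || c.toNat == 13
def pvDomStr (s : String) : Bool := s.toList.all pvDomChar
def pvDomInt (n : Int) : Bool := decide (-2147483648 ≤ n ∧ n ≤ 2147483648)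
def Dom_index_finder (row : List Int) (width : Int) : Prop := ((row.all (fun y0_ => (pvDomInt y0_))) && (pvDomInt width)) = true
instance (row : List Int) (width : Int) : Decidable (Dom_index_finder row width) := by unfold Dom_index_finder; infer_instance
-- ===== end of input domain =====

-- B replaces A's forward-scan-then-full-backward-scan with one forward pass tracking
-- the first and last occurrence of 255 simultaneously (objective: simpler).

-- ===== PORT A =====
-- shared indexing primitive: row[i] (Python raises out of range; Pre_ excludes that)
def pvAt (row : List Int) (i : Int) : Int := (PySem.List.pyGet? row i).getD 0

-- inner 'for j in range(width)' loop of A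
def pvAInner (row : List Int) (width lefti : Int) : List Int → Option (List (String × Int))
  | [] => none
  | j :: js =>
    if pvAt row (width - 1 - j) = 255 then
      some [("left_index", lefti), ("right_index", width - 1 - j)]
    else pvAInner row width lefti js

-- outer 'for i in range(width)' loop of A
def pvAOuter (row : List Int) (width : Int) : List Int → Option (List (String × Int))
  | [] => none
  | i :: is =>
    if pvAt row i = 255 then pvAInner row width i (PySem.List.pyRange 0 width 1)
    else pvAOuter row width is

def index_finder (row : List Int) (width : Int) : Option (List (String × Int)) :=
  pvAOuter row width (PySem.List.pyRange 0 width 1)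

-- ===== PORT B =====
-- loop body of B's single pass: state = (left, right)
def pvBStep (row : List Int) (st : Option Int × Option Int) (i : Int) : Option Int × Option Int :=
  if pvAt row i = 255 then
    ((match st.1 with | none => some i | some l => some l), some i)
  else st

def index_finder_alt (row : List Int) (width : Int) : Option (List (String × Int)) :=
  match (PySem.List.pyRange 0 width 1).foldl (pvBStep row) (none, none) with
  | (some l, some r) => some [("left_index", l), ("right_index", r)]
  | _ => none

-- ===== PRECONDITION & SPEC =====
-- Pre_ excludes width > len(row), on which A raises IndexError.
def Pre_index_finder (row : List Int) (width : Int) : Prop := width ≤ (row.length : Int)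
instance (row : List Int) (width : Int) : Decidable (Pre_index_finder row width) := by unfold Pre_index_finder; infer_instance

def pvWitness_index_finder : List Int × Int := ([0, 255, 0, 255, 0], 5)

def Spec_index_finder (row : List Int) (width : Int) (out : Option (List (String × Int))) : Prop := out = index_finder_alt row width
instance (row : List Int) (width : Int) (out : Option (List (String × Int))) : Decidable (Spec_index_finder row width out) := by unfold Spec_index_finder; infer_instance

-- ===== CLAIM (what is proved, stated in full; the proofs are below) =====
def Claim_equal_index_finder : Prop := ∀ (row : List Int) (width : Int), Dom_index_finder row width → Pre_index_finder row width → Spec_index_finder row width (index_finder row width)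

-- ===== LEMMAS AND PROOFS =====

-- first index i in the list with row[i] == 255
def pvFirstHit (row : List Int) : List Int → Option Int
  | [] => none
  | i :: is => if pvAt row i = 255 then some i else pvFirstHit row is

-- last index i in the list with row[i] == 255
def pvLastHit (row : List Int) : List Int → Option Int
  | [] => none
  | i :: is =>
    match pvLastHit row is with
    | some v => some v
    | none => if pvAt row i = 255 then some i else none

theorem pvAOuter_firstHit (row : List Int) (width : Int) (L : List Int) :
    pvAOuter row width L =
      match pvFirstHit row L with
      | none => none
      | some i => pvAInner row width i (PySem.List.pyRange 0 width 1) := by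
  induction L with
  | nil => rfl
  | cons i is ih =>
    simp only [pvAOuter, pvFirstHit]
    split_ifs with h <;> simp [ih]

theorem pvAInner_firstHit (row : List Int) (width lefti : Int) (J : List Int) :
    pvAInner row width lefti J =
      (pvFirstHit row (J.map (fun j => width - 1 - j))).map
        (fun r => [("left_index", lefti), ("right_index", r)]) := by
  induction J with
  | nil => rfl
  | cons j js ih =>
    simp only [pvAInner, List.map, pvFirstHit]
    split_ifs with h <;> simp [ih]

theorem pvFirstHit_append (row : List Int) (xs ys : List Int) :
    pvFirstHit row (xs ++ ys) =
      match pvFirstHit row xs with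
      | some v => some v
      | none => pvFirstHit row ys := by
  induction xs with
  | nil => rfl
  | cons x xs ih =>
    simp only [List.cons_append, pvFirstHit]
    split_ifs with h <;> simp [ih]

theorem pvLastHit_eq_firstHit_reverse (row : List Int) (L : List Int) :
    pvLastHit row L = pvFirstHit row L.reverse := by
  induction L with
  | nil => rfl
  | cons i is ih =>
    simp only [pvLastHit, List.reverse_cons, pvFirstHit_append, ih]
    cases pvFirstHit row is.reverse <;> simp [pvFirstHit]

theorem pvFirstHit_none_iff (row : List Int) (L : List Int) :
    pvFirstHit row L = none ↔ ∀ x ∈ L, pvAt row x ≠ 255 := by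
  induction L with
  | nil => simp [pvFirstHit]
  | cons i is ih =>
    simp only [pvFirstHit]
    split_ifs with h <;> simp [ih, h]

theorem pvLastHit_none_iff (row : List Int) (L : List Int) :
    pvLastHit row L = none ↔ pvFirstHit row L = none := by
  rw [pvLastHit_eq_firstHit_reverse, pvFirstHit_none_iff, pvFirstHit_none_iff]
  simp

-- the reversed index map of A's inner loop enumerates the range backwards
theorem pvMapRev (width : Int) :
    (PySem.List.pyRange 0 width 1).map (fun j => width - 1 - j) =
      (PySem.List.pyRange 0 width 1).reverse := by
  apply List.ext_getElem
  · simp [PySem.List.length_pyRange_one]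
  · intro k h1 h2
    have hn : (width - 0).toNat = (PySem.List.pyRange 0 width 1).length :=
      (PySem.List.length_pyRange_one 0 width).symm
    simp only [List.getElem_map, List.getElem_reverse]
    rw [PySem.List.getElem_pyRange_one, PySem.List.getElem_pyRange_one]
    have hk : k < (width - 0).toNat := by
      simpa [PySem.List.length_pyRange_one] using h2
    omega

-- B's fold with both components already set keeps left and updates right to the last hit
theorem pvFold_some (row : List Int) (L : List Int) (l r : Int) :
    L.foldl (pvBStep row) (some l, some r) = (some l, some ((pvLastHit row L).getD r)) := by
  induction L generalizing r with
  | nil => rfl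
  | cons i is ih =>
    simp only [List.foldl, pvBStep]
    split_ifs with h
    · simp only [ih]
      congr 1
      simp only [pvLastHit]
      cases pvLastHit row is <;> simp [h]
    · simp only [ih]
      congr 2
      simp only [pvLastHit]
      cases pvLastHit row is <;> simp [h]

-- B's fold from the empty state computes the first and last hit
theorem pvFold_none (row : List Int) (L : List Int) :
    L.foldl (pvBStep row) (none, none) =
      match pvFirstHit row L with
      | none => (none, none)
      | some i => (some i, some ((pvLastHit row L).getD i)) := by
  induction L with
  | nil => rfl
  | cons i is ih =>
    simp only [List.foldl, pvBStep, pvFirstHit]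
    split_ifs with h
    · simp only [pvFold_some]
      congr 1
      simp only [pvLastHit]
      cases pvLastHit row is <;> simp [h]
    · simp only [ih]
      cases hf : pvFirstHit row is <;>
        simp only [pvLastHit] <;> cases hl : pvLastHit row is <;> simp_all [pvLastHit_none_iff]

theorem index_finder_spec : Claim_equal_index_finder := by
  unfold Claim_equal_index_finder
  intro row width _ _
  unfold Spec_index_finder index_finder index_finder_alt
  rw [pvAOuter_firstHit, pvFold_none]
  cases hf : pvFirstHit row (PySem.List.pyRange 0 width 1) with
  | none => rfl
  | some i =>
    dsimp only
    rw [pvAInner_firstHit, pvMapRev, ← pvLastHit_eq_firstHit_reverse]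
    cases hl : pvLastHit row (PySem.List.pyRange 0 width 1) with
    | none => rw [pvLastHit_none_iff] at hl; simp_all
    | some r => rfl
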